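-- pv_equiv track=rewrite | github.com/ebanner/daily-leetcode | 12-28-2023/eddie.py | getOptimalCompressionRLEs
-- ===== SOURCE A (Python) =====
-- def filter_min(S):
--     min_len = min(len(s) for s in S)
--     mins = [s for s in S if len(s) == min_len]
--     return mins
--
-- def rle(s):
--     rle_str = []
--     i = 0
--     while i < len(s):
--         c = s[i]
--         j = i
--
--         while j < len(s) and s[j] == c:
--             j += 1
--
--         if j-i > 1:
--             r = f'{c}{j-i}'
--         else:
--             r = c
--
--         rle_str.append(r)
--         i = j
--
--     return ''.join(rle_str)
--
-- def expand(rle_str):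
--     i = 0
--     s = []
--     while i < len(rle_str):
--         j = i+1
--         k = j
--         while k < len(rle_str) and rle_str[k].isdigit():
--             k += 1
--         if k-j >= 1:
--             digits = rle_str[j:k]
--             chunk = rle_str[i]*int(digits)
--         else:
--             chunk = rle_str[i]
--         s.append(chunk)
--         i = k
--     return ''.join(s)
--
-- def getOptimalCompressionRLEs(s, i, k_):
--     """
--
--     Optimal compression RLEs of s starting at index i taking away k_ elements
--
--     """
--     n = len(s)
--     if k_ == 0:
--         return [rle(s[i:])]
--     elif i == n-1:
--         return [rle('')]
--
--     try_remove_rles = getOptimalCompressionRLEs(s, i+1, k_-1)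
--     dont_remove_rles = getOptimalCompressionRLEs(s, i+1, k_)
--     dont_remove_rles = [rle(s[i] + expand(rle_str)) for rle_str in dont_remove_rles]
--     dont_remove_rles = filter_min(dont_remove_rles)
--
--     try_remove_rles_min = min(len(rle_str) for rle_str in try_remove_rles)
--     dont_remove_rles_min = min(len(rle_str) for rle_str in dont_remove_rles)
--
--     if try_remove_rles_min < dont_remove_rles_min:
--         return try_remove_rles
--     elif dont_remove_rles_min < try_remove_rles_min:
--         return dont_remove_rles
--     else:
--         return try_remove_rles + dont_remove_rles
-- ===== SOURCE B (Python) =====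
-- def rle(s):
--     rle_str = []
--     i = 0
--     while i < len(s):
--         c = s[i]
--         j = i
--         while j < len(s) and s[j] == c:
--             j += 1
--         if j-i > 1:
--             r = f'{c}{j-i}'
--         else:
--             r = c
--         rle_str.append(r)
--         i = j
--     return ''.join(rle_str)
--
-- def expand(rle_str):
--     i = 0
--     s = []
--     while i < len(rle_str):
--         j = i+1
--         k = j
--         while k < len(rle_str) and rle_str[k].isdigit():
--             k += 1
--         if k-j >= 1:
--             digits = rle_str[j:k]
--             chunk = rle_str[i]*int(digits)
--         else:
--             chunk = rle_str[i]
--         s.append(chunk)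
--         i = k
--     return ''.join(s)
--
-- def combine(c, tries, subs):
--     donts = [rle(c + expand(r)) for r in subs]
--     dmin = min(len(x) for x in donts)
--     tmin = min(len(x) for x in tries)
--     if tmin < dmin:
--         return tries
--     donts = [x for x in donts if len(x) == dmin]
--     if dmin < tmin:
--         return donts
--     return tries + donts
--
-- def getOptimalCompressionRLEs(s, i, k_):
--     n = len(s)
--     if k_ == 0:
--         return [rle(s[i:])]
--     if i == n - 1:
--         return ['']
--     # removing more characters than the suffix holds behaves like removing n-i
--     kk = k_ if k_ < n - i else n - i
--     row = [[rle(s[n-1:])]] + [[''] for _ in range(kk)]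
--     for j in range(n - 2, i - 1, -1):
--         new = [[rle(s[j:])]]
--         for k in range(1, kk + 1):
--             new.append(combine(s[j], row[k - 1], row[k]))
--         row = new
--     return row[kk]
-- ===== Notes on version B (the rewrite author's own statement) =====
-- stated objective: faster
-- what changed: Replaces A's exponential branching recursion with a bottom-up dynamic-programming row sweep that computes each subproblem (position j, remaining deletions k) exactly once, clamping k to the suffix length; the rle/expand helpers are reused and A's filter_min is fused into the min comparison.
-- outside the precondition, e.g. on getOptimalCompressionRLEs('ab', 0, -1): A returns [''], B returns ['ab']
import Mathlib
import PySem

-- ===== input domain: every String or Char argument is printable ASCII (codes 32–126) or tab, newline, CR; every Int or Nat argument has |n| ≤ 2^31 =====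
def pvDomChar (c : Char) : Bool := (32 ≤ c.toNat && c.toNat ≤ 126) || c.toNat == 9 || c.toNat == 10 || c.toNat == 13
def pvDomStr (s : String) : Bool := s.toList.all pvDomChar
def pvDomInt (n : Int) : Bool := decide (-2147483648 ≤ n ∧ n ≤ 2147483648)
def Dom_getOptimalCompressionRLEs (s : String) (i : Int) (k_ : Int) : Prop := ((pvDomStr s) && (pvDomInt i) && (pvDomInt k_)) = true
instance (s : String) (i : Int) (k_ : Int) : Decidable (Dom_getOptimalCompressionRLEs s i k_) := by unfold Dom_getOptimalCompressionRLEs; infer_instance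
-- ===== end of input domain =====

-- B replaces A's exponential branching recursion by a bottom-up dynamic-programming row sweep
-- (each subproblem computed once, k clamped to the suffix length); helpers rle/expand are reused.

-- ===== PORT A =====
-- inner `while j < len(s) and s[j] == c: j += 1` of rle (fuel = remaining scan length, always sufficient)
def rleRunEnd (s : List Char) (c : Char) (j : Nat) : Nat → Nat
  | 0 => j
  | f + 1 =>
    if h : j < s.length then
      (if s[j] = c then rleRunEnd s c (j + 1) f else j)
    else j

-- outer `while i < len(s)` of rle; chunks are concatenated as ''.join does
def pyRleGo (s : List Char) (i : Nat) : Nat → List Char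
  | 0 => []
  | f + 1 =>
    if h : i < s.length then
      let c := s[i]
      let j := rleRunEnd s c i (s.length - i)
      (if j - i > 1 then c :: PySem.Int.toChars ((j : Int) - (i : Int)) else [c]) ++ pyRleGo s j f
    else []

def pyRle (s : List Char) : List Char := pyRleGo s 0 (s.length + 1)

-- inner `while k < len(rle_str) and rle_str[k].isdigit(): k += 1` of expand
def digitEnd (r : List Char) (k : Nat) : Nat → Nat
  | 0 => k
  | f + 1 =>
    if h : k < r.length then
      (if PySem.Chars.isdigit r[k] then digitEnd r (k + 1) f else k)
    else k

-- `expand`; int(digits) never raises here (digits is a nonempty run of ASCII digits), the none branch is unreachable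
def pyExpandGo (r : List Char) (i : Nat) : Nat → List Char
  | 0 => []
  | f + 1 =>
    if h : i < r.length then
      let k := digitEnd r (i + 1) (r.length - i)
      (if k - (i + 1) ≥ 1 then
          (match PySem.Int.ofChars? (PySem.List.slice r (some ((i : Int) + 1)) (some (k : Int))) with
           | some v => List.replicate v.toNat r[i]
           | none => [])
        else [r[i]]) ++ pyExpandGo r k f
    else []

def pyExpand (r : List Char) : List Char := pyExpandGo r 0 (r.length + 1)

def pyMinLen (L : List (List Char)) : Nat :=
  match PySem.List.min? (L.map List.length) (fun x => x) with
  | some m => m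
  | none => 0

-- filter_min
def pyFilterMin (L : List (List Char)) : List (List Char) :=
  L.filter (fun x => x.length == pyMinLen L)

-- the recursion of A, with fuel for the `i+1` steps (inside Pre_ the fuel is never exhausted)
def goA (s : List Char) (fuel : Nat) (i k : Int) : List (List Char) :=
  if k = 0 then [pyRle (PySem.List.slice s (some i) none)]
  else if i = (s.length : Int) - 1 then [pyRle []]
  else
    match fuel with
    | 0 => []
    | f + 1 =>
      let tryR := goA s f (i + 1) (k - 1)
      let dontR := pyFilterMin ((goA s f (i + 1) k).map
        (fun r => pyRle ((PySem.List.pyGet? s i).getD ' ' :: pyExpand r)))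
      let tMin := pyMinLen tryR
      let dMin := pyMinLen dontR
      if tMin < dMin then tryR
      else if dMin < tMin then dontR
      else tryR ++ dontR

def getOptimalCompressionRLEs (s : String) (i : Int) (k_ : Int) : List String :=
  (goA s.toList (2 * s.toList.length + 2) i k_).map (fun r => String.ofList r)

-- ===== PORT B =====
-- combine of Source B: fuses A's filter_min into the comparison (min of the filtered list = min of the list)
def combineB (c : Char) (tries subs : List (List Char)) : List (List Char) :=
  let donts := subs.map (fun r => pyRle (c :: pyExpand r))
  let dmin := pyMinLen donts
  let tmin := pyMinLen tries
  if tmin < dmin then tries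
  else
    let donts2 := donts.filter (fun x => x.length == dmin)
    if dmin < tmin then donts2
    else tries ++ donts2

def getOptimalCompressionRLEs_alt (s : String) (i : Int) (k_ : Int) : List String :=
  let cs := s.toList
  let n : Int := (cs.length : Int)
  if k_ = 0 then [String.ofList (pyRle (PySem.List.slice cs (some i) none))]
  else if i = n - 1 then [""]
  else
    let kk := if k_ < n - i then k_ else n - i
    let row0 : List (List (List Char)) :=
      [pyRle (PySem.List.slice cs (some (n - 1)) none)] :: List.replicate kk.toNat [[]]
    let row := (PySem.List.pyRange (n - 2) (i - 1) (-1)).foldl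
      (fun row j =>
        (PySem.List.pyRange 1 (kk + 1) 1).foldl
          (fun new k =>
            new ++ [combineB ((PySem.List.pyGet? cs j).getD ' ')
                      (PySem.List.pyGetD row (k - 1) [])
                      (PySem.List.pyGetD row k [])])
          [[pyRle (PySem.List.slice cs (some j) none)]])
      row0
    (PySem.List.pyGetD row kk []).map (fun r => String.ofList r)

-- ===== PRECONDITION & SPEC =====
-- Pre_ excludes negative k_ (k_ is a count of deletions; outside the natural domain) and, for k_ ≠ 0,
-- start indices i outside [-n, n-1] (and i ≠ n-1), on which A raises RecursionError or IndexError.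
def Pre_getOptimalCompressionRLEs (s : String) (i : Int) (k_ : Int) : Prop :=
  0 ≤ k_ ∧ (k_ = 0 ∨ i = (s.toList.length : Int) - 1 ∨
    (-(s.toList.length : Int) ≤ i ∧ i ≤ (s.toList.length : Int) - 1))
instance (s : String) (i : Int) (k_ : Int) : Decidable (Pre_getOptimalCompressionRLEs s i k_) := by
  unfold Pre_getOptimalCompressionRLEs; infer_instance

def pvWitness_getOptimalCompressionRLEs : String × Int × Int := ("aab", 0, 1)

def Spec_getOptimalCompressionRLEs (s : String) (i : Int) (k_ : Int) (out : List String) : Prop := out = getOptimalCompressionRLEs_alt s i k_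
instance (s : String) (i : Int) (k_ : Int) (out : List String) : Decidable (Spec_getOptimalCompressionRLEs s i k_ out) := by unfold Spec_getOptimalCompressionRLEs; infer_instance

-- ===== CLAIM (what is proved, stated in full; the proofs are below) =====
def Claim_equal_getOptimalCompressionRLEs : Prop := ∀ (s : String) (i : Int) (k_ : Int), Dom_getOptimalCompressionRLEs s i k_ → Pre_getOptimalCompressionRLEs s i k_ → Spec_getOptimalCompressionRLEs s i k_ (getOptimalCompressionRLEs s i k_)

-- ===== LEMMAS AND PROOFS =====

-- the (total, fuel-free) value of A's recursion; proof-side reference function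
def rleR (s : List Char) (i k : Int) : List (List Char) :=
  if k = 0 then [pyRle (PySem.List.slice s (some i) none)]
  else if i = (s.length : Int) - 1 then [pyRle []]
  else if h : i < (s.length : Int) - 1 then
    let tryR := rleR s (i + 1) (k - 1)
    let dontR := pyFilterMin ((rleR s (i + 1) k).map
      (fun r => pyRle ((PySem.List.pyGet? s i).getD ' ' :: pyExpand r)))
    if pyMinLen tryR < pyMinLen dontR then tryR
    else if pyMinLen dontR < pyMinLen tryR then dontR
    else tryR ++ dontR
  else []
termination_by ((s.length : Int) - 1 - i).toNat
decreasing_by all_goals omega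

theorem pyMinLen_attained (L : List (List Char)) (h : L ≠ []) :
    ∃ x ∈ L, x.length = pyMinLen L := by
  unfold pyMinLen
  cases hm : PySem.List.min? (L.map List.length) (fun x => x) with
  | none => exact absurd (by simpa using (PySem.List.min?_eq_none_iff _ _).1 hm) h
  | some m =>
    have := PySem.List.min?_mem hm
    simp only [List.mem_map] at this
    obtain ⟨x, hx, hlen⟩ := this
    exact ⟨x, hx, hlen⟩

theorem pyMinLen_const (L : List (List Char)) (m : Nat) (h : L ≠ [])
    (hall : ∀ x ∈ L, x.length = m) : pyMinLen L = m := by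
  obtain ⟨x, hx, hlen⟩ := pyMinLen_attained L h
  rw [← hlen, hall x hx]

theorem pyFilterMin_ne_nil (L : List (List Char)) (h : L ≠ []) : pyFilterMin L ≠ [] := by
  obtain ⟨x, hx, hlen⟩ := pyMinLen_attained L h
  have : x ∈ pyFilterMin L := by
    unfold pyFilterMin
    simp [List.mem_filter, hx, hlen]
  exact List.ne_nil_of_mem this

theorem pyMinLen_pyFilterMin (L : List (List Char)) (h : L ≠ []) :
    pyMinLen (pyFilterMin L) = pyMinLen L := by
  apply pyMinLen_const
  · exact pyFilterMin_ne_nil L h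
  · intro x hx
    unfold pyFilterMin at hx
    simp only [List.mem_filter, beq_iff_eq] at hx
    exact hx.2

theorem rleR_ne_nil (s : List Char) (i k : Int) (h : k = 0 ∨ i ≤ (s.length : Int) - 1) :
    rleR s i k ≠ [] := by
  rw [rleR]
  by_cases hk : k = 0
  · simp [hk]
  · rw [if_neg hk]
    by_cases hi : i = (s.length : Int) - 1
    · simp [hi]
    · have hi' : i < (s.length : Int) - 1 := by omega
      rw [if_neg hi, dif_pos hi']
      have hT : rleR s (i + 1) (k - 1) ≠ [] :=
        rleR_ne_nil s (i + 1) (k - 1) (Or.inr (by omega))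
      have hD : pyFilterMin ((rleR s (i + 1) k).map
          (fun r => pyRle ((PySem.List.pyGet? s i).getD ' ' :: pyExpand r))) ≠ [] := by
        apply pyFilterMin_ne_nil
        simpa using rleR_ne_nil s (i + 1) k (Or.inr (by omega))
      dsimp only
      split_ifs
      · exact hT
      · exact hD
      · simp [hT]
  termination_by ((s.length : Int) - 1 - i).toNat
  decreasing_by all_goals omega

theorem combineB_eq (c : Char) (T D : List (List Char)) (hT : T ≠ []) (hD : D ≠ []) :
    combineB c T D =
      (let dontR := pyFilterMin (D.map (fun r => pyRle (c :: pyExpand r)))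
       if pyMinLen T < pyMinLen dontR then T
       else if pyMinLen dontR < pyMinLen T then dontR
       else T ++ dontR) := by
  have hD' : D.map (fun r => pyRle (c :: pyExpand r)) ≠ [] := by simpa using hD
  simp only [combineB, pyMinLen_pyFilterMin _ hD']
  rfl

theorem rleR_step (s : List Char) (i k : Int) (hk : k ≠ 0) (hi : i < (s.length : Int) - 1) :
    rleR s i k = combineB ((PySem.List.pyGet? s i).getD ' ')
      (rleR s (i + 1) (k - 1)) (rleR s (i + 1) k) := by
  have hne : i ≠ (s.length : Int) - 1 := by omega
  rw [combineB_eq _ _ _ (rleR_ne_nil s (i + 1) (k - 1) (Or.inr (by omega)))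
        (rleR_ne_nil s (i + 1) k (Or.inr (by omega)))]
  conv_lhs => rw [rleR]
  rw [if_neg hk, if_neg hne, dif_pos hi]

theorem goA_eq_rleR (s : List Char) (fuel : Nat) (i k : Int)
    (hdom : k = 0 ∨ i ≤ (s.length : Int) - 1)
    (hfuel : ((s.length : Int) - 1 - i).toNat ≤ fuel) :
    goA s fuel i k = rleR s i k := by
  by_cases hk : k = 0
  · rw [goA.eq_def, rleR]; simp [hk]
  · by_cases hi : i = (s.length : Int) - 1
    · rw [goA.eq_def]; conv_rhs => rw [rleR]
      rw [if_neg hk, if_neg hk, if_pos hi, if_pos hi]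
    · have hi' : i < (s.length : Int) - 1 := by
        rcases hdom with h | h
        · exact absurd h hk
        · omega
      cases fuel with
      | zero => exfalso; omega
      | succ f =>
        rw [goA.eq_def]; conv_rhs => rw [rleR]
        rw [if_neg hk, if_neg hk, if_neg hi, if_neg hi, dif_pos hi']
        have h1 := goA_eq_rleR s f (i + 1) (k - 1) (Or.inr (by omega)) (by omega)
        have h2 := goA_eq_rleR s f (i + 1) k (Or.inr (by omega)) (by omega)
        dsimp only
        rw [h1, h2]
  termination_by fuel

theorem rleR_indep (s : List Char) (i k k' : Int) (hi : i ≤ (s.length : Int) - 1)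
    (hk : (s.length : Int) - i ≤ k) (hk' : (s.length : Int) - i ≤ k') :
    rleR s i k = rleR s i k' := by
  have hk0 : k ≠ 0 := by omega
  have hk0' : k' ≠ 0 := by omega
  by_cases hie : i = (s.length : Int) - 1
  · conv_lhs => rw [rleR]
    conv_rhs => rw [rleR]
    rw [if_neg hk0, if_neg hk0', if_pos hie, if_pos hie]
  · have hi' : i < (s.length : Int) - 1 := by omega
    rw [rleR_step s i k hk0 hi', rleR_step s i k' hk0' hi']
    rw [rleR_indep s (i + 1) (k - 1) (k' - 1) (by omega) (by omega) (by omega),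
        rleR_indep s (i + 1) k k' (by omega) (by omega) (by omega)]
  termination_by ((s.length : Int) - 1 - i).toNat
  decreasing_by all_goals omega

theorem pyRle_nil : pyRle [] = [] := by
  rw [pyRle]
  rfl

-- the row of subproblem values [rleR s j 0, …, rleR s j kk] that B's sweep maintains
def rowAt (s : List Char) (kk : Int) (j : Int) : List (List (List Char)) :=
  (List.range (kk.toNat + 1)).map (fun k => rleR s j (Int.ofNat k))

theorem rowAt_get (s : List Char) (kk j t : Int) (h0 : 0 ≤ t) (h1 : t ≤ kk) :
    PySem.List.pyGetD (rowAt s kk j) t [] = rleR s j t := by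
  rw [PySem.List.pyGetD_of_nonneg _ _ h0]
  unfold rowAt
  rw [List.getD_eq_getElem?_getD, List.getElem?_map]
  have ht : t.toNat < kk.toNat + 1 := by omega
  simp only [List.getElem?_range, ht, Option.map_some, Option.getD_some]
  congr 1
  rw [Int.ofNat_eq_natCast]
  omega

theorem rowAt_base (s : List Char) (kk : Int) (hkk : 0 ≤ kk) :
    rowAt s kk ((s.length : Int) - 1) =
      [pyRle (PySem.List.slice s (some ((s.length : Int) - 1)) none)] :: List.replicate kk.toNat [[]] := by
  unfold rowAt
  rw [List.range_succ_eq_map, List.map_cons, List.map_map]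
  congr 1
  · rw [rleR]; simp
  · rw [List.eq_replicate_iff]
    refine ⟨by simp, ?_⟩
    intro x hx
    simp only [List.mem_map, Function.comp] at hx
    obtain ⟨t, _, rfl⟩ := hx
    rw [rleR]
    have h1 : Int.ofNat t.succ ≠ 0 := by rw [Int.ofNat_eq_natCast]; omega
    rw [if_neg h1, if_pos rfl, pyRle_nil]

theorem inner_row (s : List Char) (kk j : Int) (hkk : 1 ≤ kk) (hj : j < (s.length : Int) - 1) :
    (PySem.List.pyRange 1 (kk + 1) 1).foldl
      (fun new k => new ++ [combineB ((PySem.List.pyGet? s j).getD ' ')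
          (PySem.List.pyGetD (rowAt s kk (j + 1)) (k - 1) [])
          (PySem.List.pyGetD (rowAt s kk (j + 1)) k [])])
      [[pyRle (PySem.List.slice s (some j) none)]] = rowAt s kk j := by
  rw [PySem.List.foldl_append_singleton_eq_map, PySem.List.pyRange_one]
  have hsub : (kk + 1 - 1).toNat = kk.toNat := by omega
  rw [hsub, List.map_map]
  conv_rhs => rw [rowAt, List.range_succ_eq_map, List.map_cons, List.map_map]
  show _ :: _ = _ :: _
  congr 1
  · rw [rleR]; simp
  · apply List.map_congr_left
    intro t ht
    simp only [List.mem_range] at ht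
    simp only [Function.comp_apply]
    have e0 : Int.ofNat t.succ = 1 + (t : Int) := by rw [Int.ofNat_eq_natCast]; omega
    rw [e0, rleR_step s j (1 + (t : Int)) (by omega) hj]
    have e1 : (1 : Int) + (t : Int) - 1 = (t : Int) := by omega
    rw [e1, rowAt_get s kk (j + 1) (t : Int) (by omega) (by omega),
        rowAt_get s kk (j + 1) ((1 : Int) + (t : Int)) (by omega) (by omega)]

theorem row_loop (s : List Char) (kk i j : Int) (hkk : 1 ≤ kk)
    (h1 : i - 1 ≤ j) (h2 : j ≤ (s.length : Int) - 2) :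
    (PySem.List.pyRange j (i - 1) (-1)).foldl
      (fun row j' =>
        (PySem.List.pyRange 1 (kk + 1) 1).foldl
          (fun new k => new ++ [combineB ((PySem.List.pyGet? s j').getD ' ')
              (PySem.List.pyGetD row (k - 1) []) (PySem.List.pyGetD row k [])])
          [[pyRle (PySem.List.slice s (some j') none)]])
      (rowAt s kk (j + 1)) = rowAt s kk i := by
  by_cases hj : j ≤ i - 1
  · rw [PySem.List.pyRange_neg_one_eq_nil hj]
    simp only [List.foldl_nil]
    congr 1
    omega
  · rw [PySem.List.pyRange_neg_one_cons (by omega), List.foldl_cons]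
    rw [inner_row s kk j hkk (by omega)]
    have h := row_loop s kk i (j - 1) hkk (by omega) (by omega)
    rw [show j - 1 + 1 = j by omega] at h
    exact h
  termination_by (j - (i - 1)).toNat
  decreasing_by omega

-- ===== VERDICT (by name: the statement is the Claim_ definition above) =====
theorem getOptimalCompressionRLEs_spec : Claim_equal_getOptimalCompressionRLEs := by
  intro s i k_ hdom hpre
  unfold Spec_getOptimalCompressionRLEs
  unfold getOptimalCompressionRLEs getOptimalCompressionRLEs_alt
  obtain ⟨hk0, hcase⟩ := hpre
  by_cases hk : k_ = 0
  · rw [goA.eq_def]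
    simp [hk]
  · by_cases hi : i = (s.toList.length : Int) - 1
    · rw [goA.eq_def]
      simp [hk, hi, pyRle_nil]
    · have hrange : -(s.toList.length : Int) ≤ i ∧ i ≤ (s.toList.length : Int) - 1 := by
        rcases hcase with h | h | h
        · exact absurd h hk
        · exact absurd h hi
        · exact h
      have hi' : i < (s.toList.length : Int) - 1 := by omega
      dsimp only
      rw [if_neg hk, if_neg hi]
      set cs := s.toList with hcs
      set kk := (if k_ < (cs.length : Int) - i then k_ else (cs.length : Int) - i) with hkk
      have hkk1 : 1 ≤ kk := by rw [hkk]; split_ifs <;> omega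
      have hkkle : kk ≤ (cs.length : Int) - i := by rw [hkk]; split_ifs <;> omega
      rw [show ([pyRle (PySem.List.slice cs (some ((cs.length : Int) - 1)))] ::
            List.replicate kk.toNat [[]]) = rowAt cs kk ((cs.length : Int) - 1) from
          (rowAt_base cs kk (by omega)).symm]
      rw [show ((cs.length : Int) - 1) = ((cs.length : Int) - 2) + 1 by omega]
      rw [row_loop cs kk i ((cs.length : Int) - 2) hkk1 (by omega) (by omega)]
      rw [rowAt_get cs kk i kk (by omega) (le_refl kk)]
      rw [goA_eq_rleR cs _ i k_ (Or.inr (by omega)) (by omega)]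
      congr 1
      by_cases hlt : k_ < (cs.length : Int) - i
      · rw [hkk, if_pos hlt]
      · rw [hkk, if_neg hlt]
        exact rleR_indep cs i k_ ((cs.length : Int) - i) (by omega) (by omega) (by omega)
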